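-- pv_equiv track=rewrite | github.com/heeeeee0129/CodingTest | 프로그래머스/2/17687. ［3차］ n진수 게임/［3차］ n진수 게임.py | solution
-- ===== SOURCE A (Python) =====
-- def convert(n, base):#n:10진수 base: 진수 k
--     T = "0123456789ABCDEF"
--     q, r = divmod(n, base)
--     if q == 0:
--         return T[r]
--     else:
--         return convert(q, base) + T[r]
--
-- def solution(n, t, m, p):
--     answer = ''
--     all_number = ""
--     cur_num = 0
--     while len(all_number) <= m * t:
--         # result_arr = convert_num(n, cur_num)
--         # cur_num += 1
--         # while result_arr:
--         #     c = result_arr.pop()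
--         #     if n == 16 and c in alpha_dict:
--         #         all_number += alpha_dict[c]
--         #     else:
--         #         all_number += str(c)
--         all_number += convert(cur_num, n)
--         cur_num += 1
--
--     for i in range(p-1, m*t, m):
--         answer+= all_number[i]
--
--
--
--     return answer
-- ===== SOURCE B (Python) =====
-- def solution(n, t, m, p):
--     digits = "0123456789ABCDEF"
--     all_number = ''
--     total = 0          # running length of all_number
--     k = 0
--     while total <= m * t:
--         if k == 0:
--             rep = '0'
--         else:
--             buf = []
--             x = k
--             while x > 0:
--                 x, r = divmod(x, n)
--                 buf.append(digits[r])
--             buf.reverse()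
--             rep = ''.join(buf)
--         all_number += rep
--         total += len(rep)
--         k += 1
--     return all_number[p-1 : m*t : m]
-- ===== Notes on version B (the rewrite author's own statement) =====
-- stated objective: alternative
-- what changed: The recursive `convert` helper (string concatenation up the recursion) is replaced by an iterative divmod digit-peeling loop into a buffer that is reversed and joined, the outer loop keeps an explicit running length counter instead of re-reading len(all_number), and the per-index sampling loop over range(p-1, m*t, m) is replaced by one extended slice all_number[p-1:m*t:m].
-- outside the precondition, e.g. on solution(2, 1, 2, 0): A returns '01', B returns ''; on solution(-5, 1, 2, 2): A returns 'F', B returns 'C'; on solution(1, 1, 2, 1): A raises RecursionError, B does not finish within the time limit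
import Mathlib
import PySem

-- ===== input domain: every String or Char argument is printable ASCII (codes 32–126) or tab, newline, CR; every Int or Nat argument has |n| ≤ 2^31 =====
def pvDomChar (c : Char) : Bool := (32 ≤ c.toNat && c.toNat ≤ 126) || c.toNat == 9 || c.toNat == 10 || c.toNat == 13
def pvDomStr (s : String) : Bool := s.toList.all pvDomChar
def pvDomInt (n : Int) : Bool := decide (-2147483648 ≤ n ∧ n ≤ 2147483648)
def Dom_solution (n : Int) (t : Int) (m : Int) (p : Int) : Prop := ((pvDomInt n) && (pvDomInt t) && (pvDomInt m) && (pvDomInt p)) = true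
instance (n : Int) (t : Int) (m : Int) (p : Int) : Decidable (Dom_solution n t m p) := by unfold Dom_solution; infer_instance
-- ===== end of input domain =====

-- B replaces the recursive digit conversion by an iterative divmod peel-reverse loop with an explicit running
-- length counter, and the per-index sampling loop by one extended slice (alternative decomposition, same cost).

-- ===== PORT A =====
-- the digit table T = "0123456789ABCDEF" (same literal in both Pythons)
def pvT : List Char := "0123456789ABCDEF".toList

-- convert(n, base); the fuel only makes the Python recursion total, fuel x.toNat+1 always suffices
def convertA (fuel : Nat) (x base : Int) : List Char :=
  match fuel with
  | 0 => []
  | f + 1 =>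
    let q := PySem.Int.floordiv x base
    let r := PySem.Int.mod x base
    if q = 0 then [PySem.List.pyGetD pvT r ' ']
    else convertA f q base ++ [PySem.List.pyGetD pvT r ' ']

-- while len(all_number) <= m*t: all_number += convert(cur_num, n); cur_num += 1
def buildA (fuel : Nat) (n mt : Int) (all : List Char) (cur : Int) : List Char :=
  match fuel with
  | 0 => all
  | f + 1 =>
    if (all.length : Int) ≤ mt then
      buildA f n mt (all ++ convertA (cur.toNat + 1) cur n) (cur + 1)
    else all

def solution (n : Int) (t : Int) (m : Int) (p : Int) : String :=
  let all := buildA ((m * t).toNat + 2) n (m * t) [] 0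
  let answer := (PySem.List.pyRange (p - 1) (m * t) m).foldl
      (fun acc i => acc ++ [PySem.List.pyGetD all i ' ']) []
  String.ofList answer

-- ===== PORT B =====
-- while x > 0: x, r = divmod(x, n); buf.append(digits[r])   (fuel x.toNat+1 always suffices)
def peelB (fuel : Nat) (x n : Int) (buf : List Char) : List Char :=
  match fuel with
  | 0 => buf
  | f + 1 =>
    if 0 < x then
      peelB f (PySem.Int.floordiv x n) n (buf ++ [PySem.List.pyGetD pvT (PySem.Int.mod x n) ' '])
    else buf

-- while total <= m*t: rep = '0' if k == 0 else reversed peel; all_number += rep; total += len(rep); k += 1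
def buildB (fuel : Nat) (n mt : Int) (all : List Char) (total : Int) (k : Int) : List Char :=
  match fuel with
  | 0 => all
  | f + 1 =>
    if total ≤ mt then
      let rep := if k = 0 then ['0'] else (peelB (k.toNat + 1) k n []).reverse
      buildB f n mt (all ++ rep) (total + (rep.length : Int)) (k + 1)
    else all

def solution_alt (n : Int) (t : Int) (m : Int) (p : Int) : String :=
  let all_number := buildB ((m * t).toNat + 2) n (m * t) [] 0 0
  String.ofList ((PySem.List.slice? all_number (some (p - 1)) (some (m * t)) m).getD [])

-- ===== PRECONDITION & SPEC =====
-- Pre_ is the task's natural domain (base 2..16 — or any base ≥ 2 while the sequence stays below the digit 16,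
-- i.e. m*t ≤ 15 — with m ≥ 1 and 1-indexed p ≥ 1) plus the degenerate inputs on which A still returns normally:
-- the generation loop never runs (m*t < 0) or runs exactly once (t = 0, any base n ≠ 0), and for m ≤ -1 the
-- sampling range is empty (p-1 ≤ m*t) while the generation loop either never runs, runs once, or uses a base whose
-- digit lookups stay inside the 16-entry table (-16 ≤ n ≤ -2, or n ≥ 2 with n ≤ 16 ∨ m*t ≤ 15); outside Pre_,
-- A raises (ZeroDivisionError / RecursionError / IndexError / ValueError) or returns a value only through
-- accidental negative-index wraparound into the digit table (n ≤ -1 with a sampled index) or into all_number (p ≤ 0).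
def Pre_solution (n : Int) (t : Int) (m : Int) (p : Int) : Prop :=
  (2 ≤ n ∧ (n ≤ 16 ∨ m * t ≤ 15) ∧ 1 ≤ m ∧ 1 ≤ p)
  ∨ (m * t < 0 ∧ 1 ≤ m ∧ m * t ≤ p - 1)
  ∨ (m ≤ -1 ∧ p - 1 ≤ m * t ∧
      (m * t < 0 ∨ (t = 0 ∧ n ≠ 0) ∨
       (1 ≤ p ∧ ((-16 ≤ n ∧ n ≤ -2) ∨ (2 ≤ n ∧ (n ≤ 16 ∨ m * t ≤ 15))))))
  ∨ (t = 0 ∧ n ≠ 0 ∧ 1 ≤ m ∧ 1 ≤ p)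
instance (n : Int) (t : Int) (m : Int) (p : Int) : Decidable (Pre_solution n t m p) := by
  unfold Pre_solution; infer_instance

def pvWitness_solution : Int × Int × Int × Int := (2, 1, 2, 1)

def Spec_solution (n : Int) (t : Int) (m : Int) (p : Int) (out : String) : Prop := out = solution_alt n t m p
instance (n : Int) (t : Int) (m : Int) (p : Int) (out : String) : Decidable (Spec_solution n t m p out) := by
  unfold Spec_solution; infer_instance

-- ===== CLAIM (what is proved, stated in full; the proofs are below) =====
def Claim_equal_solution : Prop := ∀ (n : Int) (t : Int) (m : Int) (p : Int), Dom_solution n t m p → Pre_solution n t m p → Spec_solution n t m p (solution n t m p)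

-- ===== LEMMAS AND PROOFS =====

lemma floordiv_lt (n x : Int) (hn : 2 ≤ n) (hx : 0 ≤ x) (hne : PySem.Int.floordiv x n ≠ 0) :
    0 ≤ PySem.Int.floordiv x n ∧ (PySem.Int.floordiv x n).toNat < x.toNat := by
  rw [PySem.Int.floordiv_eq_ediv_of_pos (by omega)] at *
  have h0 : 0 ≤ x / n := Int.ediv_nonneg hx (by omega)
  have hxn : n ≤ x := by
    by_contra h
    exact hne (Int.ediv_eq_zero_of_lt hx (by omega))
  have : x / n < x := by
    rw [Int.ediv_lt_iff_lt_mul (by omega)]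
    nlinarith
  constructor
  · exact h0
  · omega

-- the accumulator of the peel loop is only ever appended to
lemma peelB_acc (n : Int) : ∀ (f : Nat) (x : Int) (buf : List Char),
    peelB f x n buf = buf ++ peelB f x n [] := by
  intro f
  induction f with
  | zero => intro x buf; simp [peelB]
  | succ g ih =>
    intro x buf
    simp only [peelB]
    by_cases hx : 0 < x
    · rw [if_pos hx, if_pos hx, ih _ (buf ++ _), ih _ ([] ++ _)]
      simp
    · simp [if_neg hx]

-- the reversed peel of x ≥ 1 is exactly A's recursive convert (with the same fuel)
lemma peelB_rev (n : Int) (hn : 2 ≤ n) : ∀ (f : Nat) (x : Int), 1 ≤ x → x.toNat < f →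
    (peelB f x n []).reverse = convertA f x n := by
  intro f
  induction f with
  | zero => intro x hx h; omega
  | succ g ih =>
    intro x hx h
    simp only [peelB, convertA]
    rw [if_pos (by omega : 0 < x)]
    rw [peelB_acc n g _ _, List.nil_append, List.reverse_append, List.reverse_cons,
      List.reverse_nil, List.nil_append]
    by_cases hq : PySem.Int.floordiv x n = 0
    · rw [if_pos hq, hq]
      have hg : peelB g 0 n [] = [] := by
        cases g <;> simp [peelB]
      rw [hg]
      simp
    · obtain ⟨hq0, hqlt⟩ := floordiv_lt n x hn (by omega) hq
      rw [if_neg hq, ih _ (by omega) (by omega)]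

-- both generation loops produce the same character sequence, step for step
lemma loop_eq (n mt : Int) (hn : 2 ≤ n) :
    ∀ (fuel : Nat) (k : Nat) (all : List Char) (total : Int),
      total = (all.length : Int) →
      buildA fuel n mt all (k : Int) = buildB fuel n mt all total (k : Int) := by
  intro fuel
  induction fuel with
  | zero => intro k all total ht; simp [buildA, buildB]
  | succ f ih =>
    intro k all total ht
    simp only [buildA, buildB]
    rw [← ht]
    by_cases hc : total ≤ mt
    · rw [if_pos hc, if_pos hc]
      have hrep : convertA ((k : Int).toNat + 1) (k : Int) n
          = (if (k : Int) = 0 then ['0'] else (peelB ((k : Int).toNat + 1) (k : Int) n []).reverse) := by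
        by_cases hk0 : (k : Int) = 0
        · rw [if_pos hk0, hk0]
          have hd0 : PySem.Int.floordiv 0 n = 0 := by
            rw [PySem.Int.floordiv_eq_ediv_of_pos (by omega)]; simp
          have hm0 : PySem.Int.mod 0 n = 0 := by
            rw [PySem.Int.mod_eq_emod_of_pos (by omega)]; simp
          simp [convertA, hd0, hm0]
          decide
        · rw [if_neg hk0, peelB_rev n hn _ _ (by omega) (by omega)]
      rw [hrep]
      have hk1 : (k : Int) + 1 = ((k + 1 : Nat) : Int) := by push_cast; ring
      rw [hk1]
      apply ih (k + 1)
      simp [← ht]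
    · rw [if_neg hc, if_neg hc]

lemma convertA_ne_nil (f : Nat) (x base : Int) : convertA (f + 1) x base ≠ [] := by
  simp only [convertA]
  split_ifs <;> simp

lemma buildA_len (n mt : Int) :
    ∀ (fuel : Nat) (all : List Char) (cur : Int), 0 ≤ cur →
      mt + 2 ≤ (all.length : Int) + (fuel : Int) →
      mt < ((buildA fuel n mt all cur).length : Int) := by
  intro fuel
  induction fuel with
  | zero => intro all cur _ h; simp only [buildA]; omega
  | succ f ih =>
    intro all cur hcur h
    simp only [buildA]
    by_cases hc : (all.length : Int) ≤ mt
    · rw [if_pos hc]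
      apply ih _ (cur + 1) (by omega)
      have hne : convertA (cur.toNat + 1) cur n ≠ [] := convertA_ne_nil _ _ _
      have : 1 ≤ (convertA (cur.toNat + 1) cur n).length := by
        cases h' : convertA (cur.toNat + 1) cur n with
        | nil => exact absurd h' hne
        | cons a l => simp
      simp only [List.length_append]
      push_cast
      push_cast at h
      omega
    · rw [if_neg hc]; omega

lemma slice?_nil_getD (a? b? : Option Int) (st : Int) :
    (PySem.List.slice? ([] : List Char) a? b? st).getD [] = [] := by
  simp only [PySem.List.slice?]
  split_ifs with h
  · rfl
  all_goals simp

-- an extended slice with positive step and in-range bounds is the sampling loop's index map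
lemma slice_pos_eq (xs : List Char) (a b st : Int) (h0 : 0 < st) (ha : 0 ≤ a)
    (hb0 : 0 ≤ b) (hb : b ≤ (xs.length : Int)) :
    (PySem.List.slice? xs (some a) (some b) st).getD []
      = (PySem.List.pyRange a b st).map (fun i => PySem.List.pyGetD xs i ' ') := by
  have hst0 : st ≠ 0 := by omega
  have hstneg : ¬ st < 0 := by omega
  simp only [PySem.List.slice?, PySem.List.sliceIndices, PySem.List.pyRange, if_neg hst0,
    if_neg hstneg, if_pos h0, if_neg (not_lt.mpr ha), if_neg (not_lt.mpr hb0)]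
  have hs : min b (xs.length : Int) = b := min_eq_left hb
  rw [hs]
  by_cases hab : a < b
  · have haLen : a < (xs.length : Int) := by omega
    have hsa : min a (xs.length : Int) = a := min_eq_left (by omega)
    rw [hsa, if_pos hab, Option.getD_some]
    have key : ∀ k ∈ List.range ((b - a + st - 1) / st).toNat,
        xs[(a + st * (k : Int)).toNat]? = some (PySem.List.pyGetD xs (a + st * (k : Int)) ' ') := by
      intro k hk
      rw [List.mem_range] at hk
      have hc0 : 0 ≤ (b - a + st - 1) / st := Int.ediv_nonneg (by omega) (by omega)
      have hkc : (k : Int) < (b - a + st - 1) / st := by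
        omega
      have hmul : st * ((k : Int) + 1) ≤ b - a + st - 1 := by
        have h1 : (k : Int) + 1 ≤ (b - a + st - 1) / st := by omega
        have h2 : st * ((b - a + st - 1) / st) ≤ b - a + st - 1 := by
          have := Int.emod_nonneg (b - a + st - 1) (by omega : st ≠ 0)
          have := Int.mul_ediv_add_emod (b - a + st - 1) st
          omega
        calc st * ((k : Int) + 1) ≤ st * ((b - a + st - 1) / st) := by
              apply mul_le_mul_of_nonneg_left h1 (by omega)
          _ ≤ b - a + st - 1 := h2
      have hidx : a + st * (k : Int) < b := by nlinarith
      have hge : 0 ≤ a + st * (k : Int) := by positivity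
      have hlen : a + st * (k : Int) < (xs.length : Int) := by omega
      rw [PySem.List.pyGetD_eq_getElem _ ' ' hge hlen]
      rw [List.getElem?_eq_getElem (by omega)]
    rw [List.map_map]
    exact List.filterMap_eq_map_iff_forall_eq_some.mpr key
  · rw [if_neg hab]
    have hsge : ¬ min a (xs.length : Int) < b := by
      simp only [not_lt] at hab ⊢
      exact le_min hab hb
    rw [if_neg hsge, Option.getD_some]
    simp

-- a slice with negative step and start ≤ stop (with one of the stated side conditions) is empty
lemma slice?_neg_empty (xs : List Char) (a b st : Int) (hst : st < 0) (hab : a ≤ b)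
    (hside : 0 ≤ a ∨ b < 0 ∨ (xs.length : Int) ≤ b + 1) :
    (PySem.List.slice? xs (some a) (some b) st).getD [] = [] := by
  have hst0 : st ≠ 0 := by omega
  simp only [PySem.List.slice?, PySem.List.sliceIndices, if_neg hst0, if_pos hst]
  rw [if_neg (by omega : ¬ (0 : Int) < st)]
  have hkey : ¬ ((if b < 0 then max (b + (xs.length : Int)) (-1) else min b ((xs.length : Int) - 1))
      < (if a < 0 then max (a + (xs.length : Int)) (-1) else min a ((xs.length : Int) - 1))) := by
    split_ifs <;> omega
  rw [if_neg hkey]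
  simp

-- A's all_number is empty when the generation loop never runs
lemma buildA_neg (n mt : Int) (hmt : mt < 0) : buildA (mt.toNat + 2) n mt [] 0 = [] := by
  have h0 : mt.toNat = 0 := by omega
  rw [h0]
  simp [buildA, show ¬ ((0 : Int) ≤ mt) by omega]

lemma buildB_neg (n mt : Int) (hmt : mt < 0) : buildB (mt.toNat + 2) n mt [] 0 0 = [] := by
  have h0 : mt.toNat = 0 := by omega
  rw [h0]
  simp [buildB, show ¬ ((0 : Int) ≤ mt) by omega]

-- the two sides agree whenever the generation loop never runs and the sampling range is empty
lemma empty_case (n t m p : Int) (hmt : m * t < 0)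
    (hr : PySem.List.pyRange (p - 1) (m * t) m = []) :
    solution n t m p = solution_alt n t m p := by
  simp only [solution, solution_alt]
  rw [buildA_neg _ _ hmt, buildB_neg _ _ hmt, hr]
  simp [slice?_nil_getD]

-- t = 0: the loop runs exactly once (all_number = "0") and the sampling range is empty, for any base n ≠ 0
lemma t0_case (n m p : Int) (hn : n ≠ 0) (hm : 1 ≤ m) (hp : 1 ≤ p) :
    solution n 0 m p = solution_alt n 0 m p := by
  have hmo0 : PySem.Int.mod 0 n = 0 := (PySem.Int.mod_eq_zero_iff_dvd 0 n).mpr (dvd_zero n)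
  have hd0 : PySem.Int.floordiv 0 n = 0 := by
    have h := PySem.Int.floordiv_mul_add_mod 0 n
    rw [hmo0] at h
    have h2 : PySem.Int.floordiv 0 n * n = 0 := by linarith
    rcases mul_eq_zero.mp h2 with h1 | h1
    · exact h1
    · exact absurd h1 hn
  have hT0 : PySem.List.pyGetD pvT 0 ' ' = '0' := by decide
  have hA : buildA 2 n 0 [] 0 = ['0'] := by
    simp [buildA, convertA, hd0, hmo0, hT0]
  have hB : buildB 2 n 0 [] 0 0 = ['0'] := by
    simp [buildB]
  have hr : PySem.List.pyRange (p - 1) 0 m = [] := by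
    simp only [PySem.List.pyRange]
    rw [if_neg (show ¬ m = 0 by omega)]
    simp [show (0 : Int) < m by omega, show ¬ (p - 1 < 0) by omega]
  simp only [solution, solution_alt, mul_zero, Int.toNat_zero]
  rw [hA, hB, PySem.List.foldl_append_singleton_eq_map, List.nil_append, hr, List.map_nil]
  rw [slice_pos_eq ['0'] (p - 1) 0 m (by omega) (by omega) le_rfl (by simp), hr, List.map_nil]

-- base ≥ 2, m ≥ 1, p ≥ 1: the two loops agree step for step and the slice is the sampled index map
lemma main_case (n t m p : Int) (hn : 2 ≤ n) (hm : 1 ≤ m) (hp : 1 ≤ p) :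
    solution n t m p = solution_alt n t m p := by
  simp only [solution, solution_alt]
  have hloop := loop_eq n (m * t) hn ((m * t).toNat + 2) 0 [] 0 (by simp)
  simp only [Nat.cast_zero] at hloop
  rw [← hloop, PySem.List.foldl_append_singleton_eq_map, List.nil_append]
  by_cases hmt : 0 ≤ m * t
  · have hlen := buildA_len n (m * t) ((m * t).toNat + 2) [] 0 le_rfl (by push_cast; omega)
    rw [slice_pos_eq _ _ _ _ (by omega) (by omega) hmt (by omega)]
  · have hall : buildA ((m * t).toNat + 2) n (m * t) [] 0 = [] := buildA_neg n (m * t) (by omega)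
    rw [hall, slice?_nil_getD]
    have hr : PySem.List.pyRange (p - 1) (m * t) m = [] := by
      simp only [PySem.List.pyRange]
      rw [if_neg (show ¬ m = 0 by omega)]
      simp [show (0 : Int) < m by omega, show ¬ (p - 1 < m * t) by omega]
    rw [hr]
    rfl

-- m ≤ -1 with p-1 ≤ m*t: both sampling ranges are empty, whatever the generated sequence holds
lemma negm_case (n t m p : Int) (hm : m ≤ -1) (hpr : p - 1 ≤ m * t)
    (hside : 0 ≤ p - 1 ∨ m * t < 0) :
    solution n t m p = solution_alt n t m p := by
  simp only [solution, solution_alt]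
  have hr : PySem.List.pyRange (p - 1) (m * t) m = [] := by
    simp only [PySem.List.pyRange]
    rw [if_neg (show ¬ m = 0 by omega)]
    simp [show ¬ (0 : Int) < m by omega, show ¬ (m * t < p - 1) by omega]
  rw [hr, List.foldl_nil,
    slice?_neg_empty _ (p - 1) (m * t) m (by omega) (by omega) (by omega)]

-- m ≤ -1, t = 0, p ≤ 0: the sequence is "0" (any base n ≠ 0) and both sampling ranges are empty
lemma negm_t0_case (n m p : Int) (_hn : n ≠ 0) (hm : m ≤ -1) (hp : p ≤ 0) :
    solution n 0 m p = solution_alt n 0 m p := by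
  have hB : buildB 2 n 0 [] 0 0 = ['0'] := by
    simp [buildB]
  have hr : PySem.List.pyRange (p - 1) 0 m = [] := by
    simp only [PySem.List.pyRange]
    rw [if_neg (show ¬ m = 0 by omega)]
    simp [show ¬ (0 : Int) < m by omega, show ¬ (1 < p) by omega]
  simp only [solution, solution_alt, mul_zero, Int.toNat_zero]
  rw [hB, hr, List.foldl_nil,
    slice?_neg_empty ['0'] (p - 1) 0 m (by omega) (by omega) (by simp)]

-- ===== VERDICT (by name: the statement is the Claim_ definition above) =====
theorem solution_spec : Claim_equal_solution := by
  intro n t m p _ hpre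
  simp only [Spec_solution]
  obtain ⟨hn, -, hm, hp⟩ | ⟨hmt, hm, hpr⟩ | ⟨hm, hpr, hd⟩ | ⟨ht, hn, hm, hp⟩ := hpre
  · exact main_case n t m p hn hm hp
  · apply empty_case n t m p hmt
    simp only [PySem.List.pyRange]
    rw [if_neg (show ¬ m = 0 by omega)]
    simp [show (0 : Int) < m by omega, show ¬ (p - 1 < m * t) by omega]
  · obtain hmt | ⟨ht, hn⟩ | ⟨hp, -⟩ := hd
    · exact negm_case n t m p hm hpr (Or.inr hmt)
    · subst ht
      by_cases hp : 1 ≤ p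
      · exact negm_case n 0 m p hm hpr (Or.inl (by omega))
      · exact negm_t0_case n m p hn hm (by omega)
    · exact negm_case n t m p hm hpr (Or.inl (by omega))
  · subst ht
    exact t0_case n m p hn hm hp
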